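-- pv_equiv track=rewrite | github.com/Mycron-Mymux/mycron-proms | z80lib.py | chunk16
-- ===== SOURCE A (Python) =====
-- def chunk16(addrs):
--     """Returns chunks of addresses, where a chunk is defined as any addresses where a/16 is the same."""
--     lst = []
--     for a in addrs:
--         if a % 16 == 0:
--             if len(lst) > 0:
--                 yield lst
--             lst = []
--         lst.append(a)
--     if len(lst) > 0:
--         yield lst
-- ===== SOURCE B (Python) =====
-- from itertools import groupby
--
-- def chunk16(addrs):
--     """Returns chunks of addresses, where a chunk is defined as any addresses where a/16 is the same."""
--     counter = [0]
--
--     def key(a):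
--         if a % 16 == 0:
--             counter[0] += 1
--         return counter[0]
--
--     for _, g in groupby(addrs, key=key):
--         yield list(g)
-- ===== Notes on version B (the rewrite author's own statement) =====
-- stated objective: idiomatic
-- what changed: Replaces the manual accumulate-and-reset list loop with itertools.groupby over a stateful group-id key that increments at each multiple of 16.
import Mathlib
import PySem

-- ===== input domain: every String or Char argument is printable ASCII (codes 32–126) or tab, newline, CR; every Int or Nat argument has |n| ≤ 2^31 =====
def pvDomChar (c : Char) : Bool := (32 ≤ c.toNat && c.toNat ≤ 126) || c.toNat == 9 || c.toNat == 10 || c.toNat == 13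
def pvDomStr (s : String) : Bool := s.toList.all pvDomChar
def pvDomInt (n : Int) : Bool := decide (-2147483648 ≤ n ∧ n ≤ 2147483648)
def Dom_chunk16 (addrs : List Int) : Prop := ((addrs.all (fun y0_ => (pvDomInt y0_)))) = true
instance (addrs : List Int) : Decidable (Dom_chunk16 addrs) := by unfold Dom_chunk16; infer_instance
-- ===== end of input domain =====

-- B replaces A's manual accumulate-and-reset loop by a groupby over a stateful
-- group-id key (idiomatic); same cost, different decomposition.

-- ===== PORT A =====
-- A: one pass with a current chunk `lst`; on a multiple of 16 flush the chunk
-- (if nonempty) and start a new one; flush the final chunk at the end.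
def chunk16 (addrs : List Int) : List (List Int) :=
  let s := addrs.foldl
    (fun (s : List (List Int) × List Int) a =>
      if PySem.Int.mod a 16 == 0 then
        ((if s.2.length > 0 then s.1 ++ [s.2] else s.1), [a])
      else
        (s.1, s.2 ++ [a]))
    ([], [])
  if s.2.length > 0 then s.1 ++ [s.2] else s.1

-- ===== PORT B =====
-- the stateful `key` closure: pair each address with its group id (the counter,
-- incremented whenever the address is a multiple of 16)
def chunk16Key : Int → List Int → List (Int × Int)
  | _, [] => []
  | c, a :: t =>
    let c' := if PySem.Int.mod a 16 == 0 then c + 1 else c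
    (c', a) :: chunk16Key c' t

-- itertools.groupby: maximal runs of consecutive equal keys, keys dropped
def chunk16Groups : List (Int × Int) → List (List Int)
  | [] => []
  | (k, a) :: rest =>
      ((k, a) :: rest.takeWhile (fun p => p.1 == k)).map Prod.snd
        :: chunk16Groups (rest.dropWhile (fun p => p.1 == k))
  termination_by l => l.length
  decreasing_by
    have := List.length_dropWhile_le (fun p : Int × Int => p.1 == k) rest
    simp only [List.length_cons]; omega

def chunk16_alt (addrs : List Int) : List (List Int) :=
  chunk16Groups (chunk16Key 0 addrs)

-- ===== PRECONDITION & SPEC =====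
def Spec_chunk16 (addrs : List Int) (out : List (List Int)) : Prop := out = chunk16_alt addrs
instance (addrs : List Int) (out : List (List Int)) : Decidable (Spec_chunk16 addrs out) := by unfold Spec_chunk16; infer_instance

-- ===== CLAIM (what is proved, stated in full; the proofs are below) =====
def Claim_equal_chunk16 : Prop := ∀ (addrs : List Int), Dom_chunk16 addrs → Spec_chunk16 addrs (chunk16 addrs)

-- ===== LEMMAS AND PROOFS =====

-- the non-multiple predicate (run continuation)
def nm16 (a : Int) : Bool := !(PySem.Int.mod a 16 == 0)

-- common recursive characterisation: chunks split before each multiple of 16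
def bRec : List Int → List (List Int)
  | [] => []
  | a :: t =>
      (a :: t.takeWhile nm16) :: bRec (t.dropWhile nm16)
  termination_by l => l.length
  decreasing_by
    have := List.length_dropWhile_le nm16 t
    simp only [List.length_cons]; omega

-- recursive form of A's fold
def aRec : List Int → List Int → List (List Int)
  | lst, [] => if lst.length > 0 then [lst] else []
  | lst, a :: t =>
    if PySem.Int.mod a 16 == 0 then
      if lst.length > 0 then lst :: aRec [a] t else aRec [a] t
    else aRec (lst ++ [a]) t

theorem mod16_true {a : Int} (h : (16:Int) ∣ a) : (PySem.Int.mod a 16 == 0) = true := by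
  simp [h]

theorem mod16_false {a : Int} (h : ¬ (16:Int) ∣ a) : (PySem.Int.mod a 16 == 0) = false := by
  simp [h]

theorem aFold (l : List Int) : ∀ (out : List (List Int)) (lst : List Int),
    (let s := l.foldl
      (fun (s : List (List Int) × List Int) a =>
        if PySem.Int.mod a 16 == 0 then
          ((if s.2.length > 0 then s.1 ++ [s.2] else s.1), [a])
        else
          (s.1, s.2 ++ [a]))
      (out, lst)
     ; if s.2.length > 0 then s.1 ++ [s.2] else s.1) = out ++ aRec lst l := by
  induction l with
  | nil => intro out lst; simp only [List.foldl_nil, aRec]; split_ifs <;> simp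
  | cons a t ih =>
      intro out lst
      by_cases hm : (16:Int) ∣ a
      · simp only [List.foldl_cons, mod16_true hm, if_true, aRec, ih]
        split_ifs <;> simp
      · simp only [List.foldl_cons, mod16_false hm, Bool.false_eq_true, if_false, aRec, ih]

theorem aRec_ne (l : List Int) : ∀ lst : List Int, lst ≠ [] →
    aRec lst l = (lst ++ l.takeWhile nm16) :: bRec (l.dropWhile nm16) := by
  induction l with
  | nil =>
      intro lst h
      rw [List.takeWhile_nil, List.dropWhile_nil, bRec]
      simp [aRec, List.length_pos_iff.mpr h]
  | cons a t ih =>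
      intro lst h
      by_cases hm : (16:Int) ∣ a
      · have hnm : nm16 a = false := by simp [nm16, hm]
        simp only [aRec, mod16_true hm, if_true, List.length_pos_iff.mpr h,
          List.takeWhile_cons, hnm, Bool.false_eq_true, if_false, List.dropWhile_cons, List.append_nil]
        rw [ih [a] (by simp), bRec]
        simp
      · have hnm : nm16 a = true := by simp [nm16, hm]
        simp only [aRec, mod16_false hm, Bool.false_eq_true, if_false,
          List.takeWhile_cons, hnm, if_true, List.dropWhile_cons]
        rw [ih (lst ++ [a]) (by simp)]
        simp

theorem aRec_nil_eq (l : List Int) : aRec [] l = bRec l := by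
  cases l with
  | nil => rw [bRec]; simp [aRec]
  | cons a t =>
      have h1 : aRec [] (a :: t) = aRec [a] t := by
        by_cases hm : (16:Int) ∣ a
        · simp [aRec]
        · simp [aRec]
      rw [h1, aRec_ne t [a] (by simp), bRec]
      simp

theorem key_takeWhile (t : List Int) : ∀ k : Int,
    (chunk16Key k t).takeWhile (fun p => p.1 == k) = chunk16Key k (t.takeWhile nm16) := by
  induction t with
  | nil => intro k; simp [chunk16Key]
  | cons a t ih =>
      intro k
      by_cases hm : (16:Int) ∣ a
      · have hnm : nm16 a = false := by simp [nm16, hm]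
        have hk : ((k + 1 : Int) == k) = false := by simp
        simp only [chunk16Key, mod16_true hm, if_true, List.takeWhile_cons, hnm,
          Bool.false_eq_true, if_false, hk]
      · have hnm : nm16 a = true := by simp [nm16, hm]
        simp only [chunk16Key, mod16_false hm, Bool.false_eq_true, if_false,
          List.takeWhile_cons, hnm, if_true, beq_self_eq_true, ih]

theorem key_dropWhile (t : List Int) : ∀ k : Int,
    (chunk16Key k t).dropWhile (fun p => p.1 == k) = chunk16Key k (t.dropWhile nm16) := by
  induction t with
  | nil => intro k; simp [chunk16Key]
  | cons a t ih =>
      intro k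
      by_cases hm : (16:Int) ∣ a
      · have hnm : nm16 a = false := by simp [nm16, hm]
        have hk : ((k + 1 : Int) == k) = false := by simp
        simp only [chunk16Key, mod16_true hm, if_true, List.dropWhile_cons, hnm,
          Bool.false_eq_true, if_false, hk]
      · have hnm : nm16 a = true := by simp [nm16, hm]
        simp only [chunk16Key, mod16_false hm, Bool.false_eq_true, if_false,
          List.dropWhile_cons, hnm, if_true, beq_self_eq_true, ih]

theorem key_map_snd (t : List Int) : ∀ k : Int, (chunk16Key k t).map Prod.snd = t := by
  induction t with
  | nil => intro k; simp [chunk16Key]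
  | cons a t ih => intro k; simp [chunk16Key, ih]

theorem groups_key (t : List Int) : ∀ k : Int,
    chunk16Groups (chunk16Key k t) = bRec t := by
  induction t using bRec.induct with
  | case1 => intro k; rw [bRec]; simp [chunk16Key, chunk16Groups]
  | case2 a t ih =>
      intro k
      simp only [chunk16Key]
      rw [chunk16Groups, key_takeWhile, key_dropWhile, ih, bRec]
      congr 1
      simp only [List.map_cons]
      rw [key_map_snd]

-- ===== VERDICT (by name: the statement is the Claim_ definition above) =====
theorem chunk16_spec : Claim_equal_chunk16 := by
  intro addrs _
  show chunk16 addrs = chunk16_alt addrs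
  unfold chunk16 chunk16_alt
  rw [aFold addrs [] [], groups_key addrs 0, aRec_nil_eq]
  simp
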